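-- pv_equiv track=rewrite | github.com/luoshunchong/NLP_N-gram | n-gram.py | text_filter
-- ===== SOURCE A (Python) =====
-- def text_filter(text: str) -> str:
--     """
--     文本过滤器：过滤掉文本数据中的标点符号和其他特殊字符
--     :param text: 待过滤的文本
--     :return: 过滤后的文本
--     """
--     result = str()
--     for t in text:
--         if t.isalnum():
--             if t.isalpha():
--                 t = t.lower()
--             result += str(t)
--     return result
-- ===== SOURCE B (Python) =====
-- # table-driven rewrite: one precomputed 128-entry translation table
-- # (delete non-alnum, map letters to lowercase), applied by str.translate
-- _TABLE = {i: (ord(chr(i).lower()) if chr(i).isalnum() else None)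
--           for i in range(128)}
--
-- def text_filter(text: str) -> str:
--     return text.translate(_TABLE)
-- ===== Notes on version B (the rewrite author's own statement) =====
-- stated objective: faster
-- what changed: Replaces A's per-character conditional loop (isalnum test, isalpha test, lower, repeated string +=) by a precomputed 128-entry translation table (delete non-alnum, map letters to lowercase) applied in one str.translate call.
import Mathlib
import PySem

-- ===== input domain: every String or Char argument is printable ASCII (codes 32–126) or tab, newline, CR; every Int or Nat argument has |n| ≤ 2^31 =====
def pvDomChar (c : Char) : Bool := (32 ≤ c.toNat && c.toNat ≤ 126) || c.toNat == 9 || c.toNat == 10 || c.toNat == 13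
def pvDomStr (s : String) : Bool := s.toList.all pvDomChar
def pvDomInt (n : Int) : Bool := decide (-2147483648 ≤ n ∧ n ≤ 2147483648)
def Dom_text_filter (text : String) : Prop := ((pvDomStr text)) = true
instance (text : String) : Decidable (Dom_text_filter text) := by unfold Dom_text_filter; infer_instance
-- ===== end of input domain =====

-- B replaces A's per-character conditional loop by a precomputed 128-entry
-- translation table (delete non-alnum, lowercase letters) applied in one pass.


-- ===== PORT A =====
-- A: one loop over the characters; appends each alnum char (lowered in place when alphabetic).
def text_filter (text : String) : String :=
  String.ofList (text.toList.foldl (fun result t =>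
    if PySem.Chars.isalnum t then
      result ++ [if PySem.Chars.isalpha t then PySem.Chars.lowerChar t else t]
    else result) [])

-- ===== PORT B =====
-- B: the module-level dict comprehension {i: (ord(chr(i).lower()) if chr(i).isalnum() else None) for i in range(128)};
-- values are Option Char (None = delete, some c = the replacement codepoint).
def pvTable : PySem.Dict Int (Option Char) :=
  PySem.Dict.ofList ((PySem.List.pyRange 0 128 1).map (fun i =>
    (i, if PySem.Chars.isalnum (Char.ofNat i.toNat) then
          some (PySem.Chars.lowerChar (Char.ofNat i.toNat)) else none)))

-- str.translate has no PySem primitive; ported by hand, exact for table values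
-- None/int codepoint: per char, look up ord(c); absent key keeps c, None deletes,
-- a codepoint replaces.
def text_filter_alt (text : String) : String :=
  String.ofList (text.toList.filterMap (fun c =>
    match pvTable.get? (c.toNat : Int) with
    | none => some c
    | some none => none
    | some (some c') => some c'))

-- ===== PRECONDITION & SPEC =====
def Spec_text_filter (text : String) (out : String) : Prop := out = text_filter_alt text
instance (text : String) (out : String) : Decidable (Spec_text_filter text out) := by unfold Spec_text_filter; infer_instance

-- ===== CLAIM (what is proved, stated in full; the proofs are below) =====
def Claim_equal_text_filter : Prop := ∀ (text : String), Dom_text_filter text → Spec_text_filter text (text_filter text)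

-- ===== LEMMAS AND PROOFS =====

-- the table lookup, characterised for every codepoint below 128
set_option maxRecDepth 10000 in
theorem pvTable_get : ∀ (i : Fin 128),
    pvTable.get? ((i : Nat) : Int) =
      some (if PySem.Chars.isalnum (Char.ofNat i) then
              some (PySem.Chars.lowerChar (Char.ofNat i)) else none) := by
  decide

-- lowerChar is the identity on non-alphabetic characters
theorem lowerChar_of_not_alpha (c : Char) (h : PySem.Chars.isalpha c = false) :
    PySem.Chars.lowerChar c = c := by
  simp only [PySem.Chars.isalpha, Bool.or_eq_false_iff] at h
  simp [PySem.Chars.lowerChar, h.1]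

-- per-character agreement of A's loop body with B's table lookup, on Dom chars
theorem step_eq (c : Char) (h : pvDomChar c = true) :
    (match pvTable.get? ((c.toNat : Nat) : Int) with
      | none => some c
      | some none => none
      | some (some c') => some c') =
    (if PySem.Chars.isalnum c then
        some (if PySem.Chars.isalpha c then PySem.Chars.lowerChar c else c)
      else none) := by
  have hlt : c.toNat < 128 := by
    simp [pvDomChar] at h
    omega
  have hc : Char.ofNat c.toNat = c := Char.ofNat_toNat c
  have := pvTable_get ⟨c.toNat, hlt⟩
  simp only [hc] at this
  rw [this]
  by_cases hal : PySem.Chars.isalnum c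
  · by_cases ha : PySem.Chars.isalpha c
    · simp [hal, ha]
    · simp [hal, ha, lowerChar_of_not_alpha c (by simp_all)]
  · simp [hal]

-- A's fold equals B's filterMap, character by character
theorem foldl_eq_filterMap (cs : List Char) (acc : List Char)
    (hdom : ∀ c ∈ cs, pvDomChar c = true) :
    cs.foldl (fun result t =>
      if PySem.Chars.isalnum t then
        result ++ [if PySem.Chars.isalpha t then PySem.Chars.lowerChar t else t]
      else result) acc
    = acc ++ cs.filterMap (fun c =>
        match pvTable.get? ((c.toNat : Nat) : Int) with
        | none => some c
        | some none => none
        | some (some c') => some c') := by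
  induction cs generalizing acc with
  | nil => simp
  | cons c cs ih =>
    have hc := hdom c (by simp)
    have hrest : ∀ x ∈ cs, pvDomChar x = true := fun x hx => hdom x (by simp [hx])
    simp only [List.foldl, List.filterMap_cons]
    rw [step_eq c hc]
    by_cases hal : PySem.Chars.isalnum c
    · simp [hal, ih _ hrest]
    · simp [hal, ih _ hrest]

-- ===== VERDICT (by name: the statement is the Claim_ definition above) =====
theorem text_filter_spec : Claim_equal_text_filter := by
  intro text hdom
  unfold Spec_text_filter text_filter text_filter_alt
  have hall : ∀ c ∈ text.toList, pvDomChar c = true := by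
    simpa [Dom_text_filter, pvDomStr, List.all_eq_true] using hdom
  rw [foldl_eq_filterMap _ _ hall]
  rfl
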